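-- pv_equiv track=rewrite | github.com/tmanuszak/ProjectEuler | P054.py | threecheck
-- ===== SOURCE A (Python) =====
-- def threecheck(h1, h2):
--     h1[0] = [cardval.index(h1[0][i]) for i in range(0, 5)]
--     h2[0] = [cardval.index(h2[0][i]) for i in range(0, 5)]
--     h1val = -1
--     h2val = -1
--     for i in range (0, 5):
--         if h1[0].count(h1[0][i]) == 3:
--             h1val = h1[0][i]
--         if h2[0].count(h2[0][i]) == 3:
--             h2val = h2[0][i]
--     if h1val == h2val and h1val != -1: # three pairs tie
--         set1 = set(h1[0])
--         set1.discard(h1val)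
--         set2 = set(h2[0])
--         set2.discard(h2val)
--         h1[0] = list(set1)
--         h2[0] = list(set2)
--         return hcheck(h1, h2)
--     elif h1val > h2val:
--         return 1
--     elif h2val > h1val:
--         return 2
--     return 0
--
-- def hcheck(h1, h2):
--     h1[0].sort()
--     h2[0].sort()
--     if len(h1[0]) > 0:
--         if h1[0][-1] == h2[0][-1]:
--             h1[0] = h1[0][0:-1]
--             h2[0] = h2[0][0:-1]
--             return hcheck(h1, h2)
--         elif h1[0][-1] > h2[0][-1]:
--             return 1
--         elif h2[0][-1] > h1[0][-1]:
--             return 2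
--     return 0
--
-- cardval = ['2', '3', '4', '5', '6', '7', '8', '9', 'T', 'J', 'Q', 'K', 'A']
-- ===== SOURCE B (Python) =====
-- # Return-value equivalent reimplementation: zip-based single reverse pass instead of
-- # recursive sort-and-pop (note: mutation of h1[0]/h2[0] differs; equivalence is about the return value).
-- cardval = ['2', '3', '4', '5', '6', '7', '8', '9', 'T', 'J', 'Q', 'K', 'A']
--
-- def _triple(ix):
--     for v in ix:
--         if ix.count(v) == 3:
--             return v
--     return -1
--
-- def threecheck(h1, h2):
--     i1 = [cardval.index(h1[0][i]) for i in range(5)]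
--     i2 = [cardval.index(h2[0][i]) for i in range(5)]
--     h1[0] = i1
--     h2[0] = i2
--     v1 = _triple(i1)
--     v2 = _triple(i2)
--     if v1 != v2:
--         return 1 if v1 > v2 else 2
--     if v1 == -1:
--         return 0
--     a = sorted(set(i1) - {v1})
--     b = sorted(set(i2) - {v2})
--     h1[0] = a
--     h2[0] = b
--     for x, y in zip(reversed(a), reversed(b)):
--         if x != y:
--             return 1 if x > y else 2
--     return 0
-- ===== Notes on version B (the rewrite author's own statement) =====
-- stated objective: alternative
-- what changed: The recursive sort-discard-and-pop tie-break (hcheck re-sorts and re-slices both lists on every call) is replaced by sorting each deduplicated remainder once and comparing them in a single zip over the reversed lists; triple detection becomes a first-match scan instead of a last-write loop over all five indices.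
import Mathlib
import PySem

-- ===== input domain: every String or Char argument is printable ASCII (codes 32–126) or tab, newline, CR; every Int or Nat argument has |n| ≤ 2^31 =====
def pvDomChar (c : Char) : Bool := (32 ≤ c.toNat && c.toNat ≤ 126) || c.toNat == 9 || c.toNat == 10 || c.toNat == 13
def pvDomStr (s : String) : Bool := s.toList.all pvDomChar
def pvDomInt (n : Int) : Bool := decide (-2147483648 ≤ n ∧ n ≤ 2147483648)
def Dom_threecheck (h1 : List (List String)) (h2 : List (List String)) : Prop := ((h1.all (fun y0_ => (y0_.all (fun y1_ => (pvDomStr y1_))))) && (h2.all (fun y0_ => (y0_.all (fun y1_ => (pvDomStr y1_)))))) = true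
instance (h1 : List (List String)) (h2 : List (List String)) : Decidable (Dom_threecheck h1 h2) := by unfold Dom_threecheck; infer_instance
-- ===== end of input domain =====

-- B replaces the recursive sort-discard-and-pop tie-break by one sort plus a single zip pass over the
-- reversed remainders (alternative decomposition, same cost). A mutates h1[0]/h2[0] in place and B's final
-- mutated state differs; the equivalence proved here is about the RETURN value only.

-- ===== PORT A =====
def cardval : List String := ["2", "3", "4", "5", "6", "7", "8", "9", "T", "J", "Q", "K", "A"]

-- cardval.index(c); the -1 branch is Python's ValueError, excluded by Pre_ (unreachable there)
def cvIdx (c : String) : Int :=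
  match PySem.List.index? cardval c with
  | some k => (k : Int)
  | none => -1

-- hcheck of A: sort both lists, compare last elements, slice off and recurse while equal.
-- b[-1] on an empty b is Python's IndexError, excluded by Pre_ (the 0 default is unreachable there).
def hcheckA (l1 l2 : List Int) : Int :=
  if h : 0 < (PySem.List.sorted l1 (fun x => x) false).length then
    if PySem.List.pyGetD (PySem.List.sorted l1 (fun x => x) false) (-1) 0 =
        PySem.List.pyGetD (PySem.List.sorted l2 (fun x => x) false) (-1) 0 then
      hcheckA (PySem.List.slice (PySem.List.sorted l1 (fun x => x) false) none (some (-1)))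
              (PySem.List.slice (PySem.List.sorted l2 (fun x => x) false) none (some (-1)))
    else if PySem.List.pyGetD (PySem.List.sorted l1 (fun x => x) false) (-1) 0 >
        PySem.List.pyGetD (PySem.List.sorted l2 (fun x => x) false) (-1) 0 then 1
    else if PySem.List.pyGetD (PySem.List.sorted l2 (fun x => x) false) (-1) 0 >
        PySem.List.pyGetD (PySem.List.sorted l1 (fun x => x) false) (-1) 0 then 2
    else 0
  else 0
termination_by l1.length
decreasing_by
  simp only [PySem.List.slice_to_neg_one, List.length_dropLast, PySem.List.length_sorted] at h ⊢
  omega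

-- list(set(...)): Python's hash iteration order is not modelled; hcheckA sorts before any comparison,
-- so the RETURN value is independent of that order and insertion order (PySem.Set) is a faithful stand-in.
def threecheck (h1 : List (List String)) (h2 : List (List String)) : Int :=
  let c1 := PySem.List.pyGetD h1 0 []   -- h1[0]; IndexError on empty h1 is excluded by Pre_
  let c2 := PySem.List.pyGetD h2 0 []
  let i1 := (PySem.List.pyRange 0 5 1).map (fun i => cvIdx (PySem.List.pyGetD c1 i ""))
  let i2 := (PySem.List.pyRange 0 5 1).map (fun i => cvIdx (PySem.List.pyGetD c2 i ""))
  let vp := (PySem.List.pyRange 0 5 1).foldl (fun (p : Int × Int) i =>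
      (if PySem.List.count i1 (PySem.List.pyGetD i1 i 0) = 3 then PySem.List.pyGetD i1 i 0 else p.1,
       if PySem.List.count i2 (PySem.List.pyGetD i2 i 0) = 3 then PySem.List.pyGetD i2 i 0 else p.2))
      (-1, -1)
  let h1val := vp.1
  let h2val := vp.2
  if h1val = h2val ∧ h1val ≠ -1 then
    hcheckA (PySem.Set.discard (PySem.Set.ofList i1) h1val)
            (PySem.Set.discard (PySem.Set.ofList i2) h2val)
  else if h1val > h2val then 1
  else if h2val > h1val then 2
  else 0

-- ===== PORT B =====
-- first value of ix whose count is 3, else -1 (the for-loop of B's _triple)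
def tripleGo (ix : List Int) : List Int → Int
  | [] => -1
  | v :: rest => if PySem.List.count ix v = 3 then v else tripleGo ix rest

def tripleB (ix : List Int) : Int := tripleGo ix ix

-- the zip loop of B: first unequal pair decides, exhaustion is a tie
def zipCmp : List (Int × Int) → Int
  | [] => 0
  | (x, y) :: rest => if x ≠ y then (if x > y then 1 else 2) else zipCmp rest

def threecheck_alt (h1 : List (List String)) (h2 : List (List String)) : Int :=
  let c1 := PySem.List.pyGetD h1 0 []
  let c2 := PySem.List.pyGetD h2 0 []
  let i1 := (PySem.List.pyRange 0 5 1).map (fun i => cvIdx (PySem.List.pyGetD c1 i ""))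
  let i2 := (PySem.List.pyRange 0 5 1).map (fun i => cvIdx (PySem.List.pyGetD c2 i ""))
  let v1 := tripleB i1
  let v2 := tripleB i2
  if v1 ≠ v2 then (if v1 > v2 then 1 else 2)
  else if v1 = -1 then 0
  else
    let a := PySem.List.sorted (PySem.Set.diff (PySem.Set.ofList i1) [v1]) (fun x => x) false
    let b := PySem.List.sorted (PySem.Set.diff (PySem.Set.ofList i2) [v2]) (fun x => x) false
    zipCmp (a.reverse.zip b.reverse)

-- ===== PRECONDITION & SPEC =====
-- hand shape on which the index conversion returns: non-empty wrapper, ≥ 5 cards, first five in cardval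
def handOk (h : List (List String)) : Prop :=
  h ≠ [] ∧ 5 ≤ (h.getD 0 []).length ∧ ∀ s ∈ (h.getD 0 []).take 5, s ∈ cardval

def idxList (h : List (List String)) : List Int :=
  ((h.getD 0 []).take 5).map cvIdx

def tailSorted (ix : List Int) (v : Int) : List Int :=
  PySem.List.sorted (PySem.Set.diff (PySem.Set.ofList ix) [v]) (fun x => x) false

-- both hands carry the same triple value v and the sorted deduplicated remainder of hand 2
-- is a proper suffix of hand 1's (the configuration on which A's hcheck reads h2[0][-1] of an empty list)
def tiedRaise (i1 i2 : List Int) : Prop :=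
  ∃ v ∈ i1, i1.count v = 3 ∧ i2.count v = 3 ∧
    tailSorted i2 v ≠ tailSorted i1 v ∧ tailSorted i2 v <:+ tailSorted i1 v

-- Pre_ excludes exactly the inputs where Python A raises: a missing/short hand or a card outside cardval
-- (IndexError/ValueError in the conversion), and the tiedRaise configuration, on which hcheck raises
-- IndexError (h2[0][-1] on an empty list) while B's zip loop would simply finish.
def Pre_threecheck (h1 : List (List String)) (h2 : List (List String)) : Prop :=
  handOk h1 ∧ handOk h2 ∧ ¬ tiedRaise (idxList h1) (idxList h2)

instance (h1 : List (List String)) (h2 : List (List String)) : Decidable (Pre_threecheck h1 h2) := by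
  unfold Pre_threecheck handOk tiedRaise; infer_instance

def pvWitness_threecheck : List (List String) × List (List String) :=
  ([["2", "2", "2", "3", "4"]], [["2", "2", "2", "3", "4"]])

def Spec_threecheck (h1 : List (List String)) (h2 : List (List String)) (out : Int) : Prop := out = threecheck_alt h1 h2
instance (h1 : List (List String)) (h2 : List (List String)) (out : Int) : Decidable (Spec_threecheck h1 h2 out) := by unfold Spec_threecheck; infer_instance

-- ===== CLAIM (what is proved, stated in full; the proofs are below) =====
def Claim_equal_threecheck : Prop := ∀ (h1 : List (List String)) (h2 : List (List String)), Dom_threecheck h1 h2 → Pre_threecheck h1 h2 → Spec_threecheck h1 h2 (threecheck h1 h2)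

-- ===== LEMMAS AND PROOFS =====

lemma cons5_of_le {α : Type} (l : List α) (h : 5 ≤ l.length) :
    ∃ a b c d e r, l = a :: b :: c :: d :: e :: r := by
  match l with
  | a :: b :: c :: d :: e :: r => exact ⟨a, b, c, d, e, r, rfl⟩
  | [] | [_] | [_, _] | [_, _, _] | [_, _, _, _] => simp at h

lemma count_two_le (ix : List Int) (x y : Int) (hxy : x ≠ y) :
    ix.count x + ix.count y ≤ ix.length := by
  induction ix with
  | nil => simp
  | cons a t ih =>
    simp only [List.count_cons, List.length_cons, beq_iff_eq]
    split_ifs <;> omega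

lemma count3_unique {ix : List Int} (h5 : ix.length = 5) {x y : Int}
    (hx : PySem.List.count ix x = 3) (hy : PySem.List.count ix y = 3) : x = y := by
  rw [PySem.List.count_eq] at hx hy
  by_contra hxy
  have := count_two_le ix x y hxy
  omega

-- under handOk the port's index-conversion comprehension is idxList
lemma idx_eq (h : List (List String)) (hh : handOk h) :
    (PySem.List.pyRange 0 5 1).map (fun i => cvIdx (PySem.List.pyGetD (PySem.List.pyGetD h 0 []) i "")) = idxList h := by
  obtain ⟨hne, hlen, -⟩ := hh
  obtain ⟨c, t, rfl⟩ : ∃ c t, h = c :: t := by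
    cases h with
    | nil => exact absurd rfl hne
    | cons c t => exact ⟨c, t, rfl⟩
  simp only [List.getD_cons_zero] at hlen
  obtain ⟨a, b, c3, d, e, r, rfl⟩ := cons5_of_le c hlen
  have w : PySem.List.pyGetD ((a :: b :: c3 :: d :: e :: r) :: t) (0 : Int) [] = a :: b :: c3 :: d :: e :: r := by
    simp [pysem]
  have g0 : PySem.List.pyGetD (a :: b :: c3 :: d :: e :: r) (0 : Int) "" = a := by simp [pysem]
  have g1 : PySem.List.pyGetD (a :: b :: c3 :: d :: e :: r) (1 : Int) "" = b := by simp [pysem]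
  have g2 : PySem.List.pyGetD (a :: b :: c3 :: d :: e :: r) (2 : Int) "" = c3 := by simp [pysem]
  have g3 : PySem.List.pyGetD (a :: b :: c3 :: d :: e :: r) (3 : Int) "" = d := by simp [pysem]
  have g4 : PySem.List.pyGetD (a :: b :: c3 :: d :: e :: r) (4 : Int) "" = e := by simp [pysem]
  show List.map _ [(0 : Int), 1, 2, 3, 4] = _
  simp only [List.map_cons, List.map_nil, w, g0, g1, g2, g3, g4, idxList, List.getD_cons_zero]
  simp [List.take_succ_cons]

lemma idxList_len (h : List (List String)) (hh : handOk h) : (idxList h).length = 5 := by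
  obtain ⟨-, hlen, -⟩ := hh
  simp only [idxList, List.length_map, List.length_take]
  omega

-- A's last-write triple-scan loop computes the same value as B's first-match scan
set_option maxHeartbeats 1600000 in
lemma foldl_triple (ix : List Int) (h5 : ix.length = 5) :
    (PySem.List.pyRange 0 5 1).foldl (fun acc i =>
        if PySem.List.count ix (PySem.List.pyGetD ix i 0) = 3 then PySem.List.pyGetD ix i 0 else acc)
      (-1) = tripleB ix := by
  obtain ⟨a, b, c, d, e, r, rfl⟩ := cons5_of_le ix (by omega)
  have hr : r = [] := by
    cases r with
    | nil => rfl
    | cons q u => simp only [List.length_cons] at h5; omega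
  subst hr
  have g0 : PySem.List.pyGetD [a, b, c, d, e] (0 : Int) 0 = a := by simp [pysem]
  have g1 : PySem.List.pyGetD [a, b, c, d, e] (1 : Int) 0 = b := by simp [pysem]
  have g2 : PySem.List.pyGetD [a, b, c, d, e] (2 : Int) 0 = c := by simp [pysem]
  have g3 : PySem.List.pyGetD [a, b, c, d, e] (3 : Int) 0 = d := by simp [pysem]
  have g4 : PySem.List.pyGetD [a, b, c, d, e] (4 : Int) 0 = e := by simp [pysem]
  show List.foldl _ _ [(0 : Int), 1, 2, 3, 4] = _
  simp only [List.foldl_cons, List.foldl_nil, g0, g1, g2, g3, g4, tripleB, tripleGo]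
  split_ifs <;> first
    | rfl
    | exact count3_unique (ix := [a, b, c, d, e]) rfl ‹_› ‹_›

-- a non-(-1) result of B's triple scan is a member with count 3
lemma tripleGo_spec (ix : List Int) : ∀ l : List Int,
    tripleGo ix l = -1 ∨ (tripleGo ix l ∈ l ∧ PySem.List.count ix (tripleGo ix l) = 3)
  | [] => Or.inl rfl
  | v :: rest => by
    simp only [tripleGo]
    split_ifs with h
    · exact Or.inr ⟨List.mem_cons_self, h⟩
    · rcases tripleGo_spec ix rest with h1 | ⟨h2, h3⟩
      · exact Or.inl h1
      · exact Or.inr ⟨List.mem_cons_of_mem _ h2, h3⟩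

lemma tripleB_count {ix : List Int} (h : tripleB ix ≠ -1) :
    tripleB ix ∈ ix ∧ ix.count (tripleB ix) = 3 := by
  rcases tripleGo_spec ix ix with h1 | ⟨h2, h3⟩
  · exact absurd h1 h
  · rw [PySem.List.count_eq] at h3
    exact ⟨h2, h3⟩

-- sorting ignores how the set difference was produced (discard vs diff)
lemma discard_sorted (ix : List Int) (v : Int) :
    PySem.List.sorted (PySem.Set.discard (PySem.Set.ofList ix) v) (fun x => x) false = tailSorted ix v := by
  unfold tailSorted
  apply PySem.List.sorted_eq_sorted_of_perm _ _ _ (fun a b hh => hh)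
  refine (List.perm_ext_iff_of_nodup (PySem.Set.nodup_discard _ v (PySem.Set.nodup_ofList ix))
      (PySem.Set.nodup_diff _ [v] (PySem.Set.nodup_ofList ix))).2 ?_
  intro y
  simp [PySem.Set.mem_discard, PySem.Set.mem_diff, PySem.Set.mem_ofList]

-- the tie-break recursion equals B's zip pass over the reversed sorted lists
lemma hcheck_zip : ∀ (n : Nat) (l1 l2 : List Int), l1.length ≤ n →
    ¬ (PySem.List.sorted l2 (fun x => x) false ≠ PySem.List.sorted l1 (fun x => x) false ∧
        PySem.List.sorted l2 (fun x => x) false <:+ PySem.List.sorted l1 (fun x => x) false) →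
    hcheckA l1 l2 =
      zipCmp ((PySem.List.sorted l1 (fun x => x) false).reverse.zip
              ((PySem.List.sorted l2 (fun x => x) false).reverse)) := by
  intro n
  induction n with
  | zero =>
    intro l1 l2 hlen _
    have h1 : l1 = [] := List.eq_nil_of_length_eq_zero (by omega)
    subst h1
    rw [hcheckA]
    simp [show (PySem.List.sorted ([] : List Int) (fun x => x) false) = [] from rfl, zipCmp]
  | succ n ih =>
    intro l1 l2 hlen hns
    rcases List.eq_nil_or_concat (PySem.List.sorted l1 (fun x => x) false) with hA | ⟨as, x, hA⟩
    · rw [hcheckA]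
      simp [hA, zipCmp]
    · rw [List.concat_eq_append] at hA
      rcases List.eq_nil_or_concat (PySem.List.sorted l2 (fun x => x) false) with hB | ⟨bs, y, hB⟩
      · exact absurd ⟨by rw [hA, hB]; simp, by rw [hB]; exact List.nil_suffix⟩ hns
      · rw [List.concat_eq_append] at hB
        have hlen1 : l1.length = as.length + 1 := by
          have := congrArg List.length hA
          simpa using this
        have hpa : (as ++ [x]).Pairwise (· ≤ ·) := by
          rw [← hA]; exact PySem.List.sorted_pairwise l1 (fun x => x)
        have hpb : (bs ++ [y]).Pairwise (· ≤ ·) := by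
          rw [← hB]; exact PySem.List.sorted_pairwise l2 (fun x => x)
        have hsa : PySem.List.sorted as (fun v => v) false = as :=
          PySem.List.sorted_eq_self_of_pairwise as (fun v => v) (hpa.sublist (List.sublist_append_left as [x]))
        have hsb : PySem.List.sorted bs (fun v => v) false = bs :=
          PySem.List.sorted_eq_self_of_pairwise bs (fun v => v) (hpb.sublist (List.sublist_append_left bs [y]))
        rw [hcheckA, hA, hB]
        rw [dif_pos (show 0 < (as ++ [x]).length by simp)]
        rw [PySem.List.pyGetD_neg_one_append_singleton, PySem.List.pyGetD_neg_one_append_singleton,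
            PySem.List.slice_to_neg_one, PySem.List.slice_to_neg_one]
        have hda : (as ++ [x]).dropLast = as := by simp
        have hdb : (bs ++ [y]).dropLast = bs := by simp
        rw [hda, hdb]
        have hzipEq : (as ++ [x]).reverse.zip ((bs ++ [y]).reverse) = (x, y) :: as.reverse.zip bs.reverse := by
          simp [List.reverse_append]
        rw [hzipEq]
        by_cases hxy : x = y
        · subst hxy
          rw [if_pos rfl]
          have hz : zipCmp ((x, x) :: as.reverse.zip bs.reverse) = zipCmp (as.reverse.zip bs.reverse) := by
            simp [zipCmp]
          rw [hz]
          have ihres := ih as bs (by omega) ?hyp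
          · rw [hsa, hsb] at ihres
            exact ihres
          case hyp =>
            rw [hsa, hsb]
            rintro ⟨hne, hsuf⟩
            apply hns
            rw [hA, hB]
            refine ⟨fun e => hne (by simpa using e), ?_⟩
            obtain ⟨p, hp⟩ := hsuf
            exact ⟨p, by rw [← List.append_assoc, hp]⟩
        · rw [if_neg hxy]
          have hz : zipCmp ((x, y) :: as.reverse.zip bs.reverse) = if x > y then 1 else 2 := by
            simp only [zipCmp]
            rw [if_pos hxy]
          rw [hz]
          split_ifs <;> omega

-- ===== VERDICT (by name: the statement is the Claim_ definition above) =====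
theorem threecheck_spec : Claim_equal_threecheck := by
  intro h1 h2 _ hpre
  obtain ⟨hk1, hk2, hns⟩ := hpre
  show threecheck h1 h2 = threecheck_alt h1 h2
  simp only [threecheck, threecheck_alt]
  simp only [idx_eq h1 hk1, idx_eq h2 hk2]
  rw [PySem.List.foldl_prod_mk
      (f := fun acc i => if PySem.List.count (idxList h1) (PySem.List.pyGetD (idxList h1) i 0) = 3 then
        PySem.List.pyGetD (idxList h1) i 0 else acc)
      (g := fun acc i => if PySem.List.count (idxList h2) (PySem.List.pyGetD (idxList h2) i 0) = 3 then
        PySem.List.pyGetD (idxList h2) i 0 else acc)]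
  simp only []
  rw [foldl_triple (idxList h1) (idxList_len h1 hk1), foldl_triple (idxList h2) (idxList_len h2 hk2)]
  by_cases hv : tripleB (idxList h1) = tripleB (idxList h2)
  · by_cases hm : tripleB (idxList h1) = -1
    · rw [if_neg (fun hc => hc.2 hm)]
      rw [if_neg (by rw [hv]; exact lt_irrefl _), if_neg (by rw [← hv]; exact lt_irrefl _)]
      rw [if_neg (fun hne => hne hv), if_pos hm]
    · rw [if_pos ⟨hv, hm⟩]
      rw [if_neg (fun hne => hne hv), if_neg hm]
      have key := hcheck_zip
          (PySem.Set.discard (PySem.Set.ofList (idxList h1)) (tripleB (idxList h1))).length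
          (PySem.Set.discard (PySem.Set.ofList (idxList h1)) (tripleB (idxList h1)))
          (PySem.Set.discard (PySem.Set.ofList (idxList h2)) (tripleB (idxList h2))) le_rfl ?ns
      · rw [discard_sorted, discard_sorted] at key
        unfold tailSorted at key
        exact key
      case ns =>
        rw [discard_sorted, discard_sorted]
        rintro ⟨hne, hsuf⟩
        obtain ⟨hmem, hc1⟩ := tripleB_count hm
        obtain ⟨-, hc2⟩ := tripleB_count (ix := idxList h2) (by rw [← hv]; exact hm)
        rw [← hv] at hc2
        rw [← hv] at hne hsuf
        exact hns ⟨tripleB (idxList h1), hmem, hc1, hc2, hne, hsuf⟩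
  · rw [if_neg (fun hc => hv hc.1), if_pos hv]
    split_ifs <;> omega
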